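-- pv_equiv track=rewrite | github.com/OlenaNN/h2o-3 | h2o-bindings/bin/gen_python.py | gen_models_docs
-- ===== SOURCE A (Python) =====
-- def gen_models_docs(modules):
--     yield ":tocdepth: 3"
--     yield ""
--     yield "Modeling In H2O"
--     yield "==============="
--     for cat in ["Supervised", "Unsupervised", "Miscellaneous"]:
--         yield ""
--         yield cat
--         yield "+" * len(cat)
--         yield ""
--         for module, clz, category in sorted(modules):
--             if category != cat: continue
--             fullmodule = "h2o.estimators.%s.%s" % (module, clz)
--             if clz == "H2OGridSearch":
--                 fullmodule = "h2o.grid.grid_search.H2OGridSearch"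
--             yield ":mod:`%s`" % clz
--             yield "-" * (7 + len(clz))
--             yield ".. autoclass:: %s" % fullmodule
--             yield "    :show-inheritance:"
--             yield "    :members:"
--             yield ""
-- ===== SOURCE B (Python) =====
-- def gen_models_docs(modules):
--     # One sort + one bucketing pass instead of re-sorting and re-scanning per category.
--     sup, uns, misc = [], [], []
--     for row in sorted(modules):
--         if row[2] == "Supervised":
--             sup.append(row)
--         elif row[2] == "Unsupervised":
--             uns.append(row)
--         elif row[2] == "Miscellaneous":
--             misc.append(row)
--     yield from (":tocdepth: 3", "", "Modeling In H2O", "===============")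
--     for cat, rows in (("Supervised", sup), ("Unsupervised", uns), ("Miscellaneous", misc)):
--         yield from ("", cat, "+" * len(cat), "")
--         for module, clz, _ in rows:
--             full = ("h2o.grid.grid_search.H2OGridSearch" if clz == "H2OGridSearch"
--                     else "h2o.estimators.%s.%s" % (module, clz))
--             yield from (":mod:`%s`" % clz, "-" * (7 + len(clz)),
--                         ".. autoclass:: %s" % full, "    :show-inheritance:", "    :members:", "")
-- ===== Notes on version B (the rewrite author's own statement) =====
-- stated objective: simpler
-- what changed: B sorts the module list once and partitions it into the three category buckets in a single pass, then emits each pre-built bucket, instead of A's re-sorting and re-scanning the whole list for every category.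
import Mathlib
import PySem

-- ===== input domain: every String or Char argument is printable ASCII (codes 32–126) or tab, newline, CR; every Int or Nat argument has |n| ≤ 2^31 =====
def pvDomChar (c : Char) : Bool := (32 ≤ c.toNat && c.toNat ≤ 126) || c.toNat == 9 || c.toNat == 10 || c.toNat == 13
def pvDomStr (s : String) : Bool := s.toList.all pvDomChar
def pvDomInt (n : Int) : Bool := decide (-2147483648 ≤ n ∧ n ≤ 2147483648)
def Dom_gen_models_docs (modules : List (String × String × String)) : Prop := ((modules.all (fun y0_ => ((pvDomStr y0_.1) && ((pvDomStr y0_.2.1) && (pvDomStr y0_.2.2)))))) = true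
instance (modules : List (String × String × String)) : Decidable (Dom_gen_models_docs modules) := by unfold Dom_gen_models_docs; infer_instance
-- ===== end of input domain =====

-- B sorts the module list once and buckets rows by category in a single pass,
-- instead of A's per-category re-sort and full re-scan; same output lines.


-- ===== PORT A =====
-- Python's tuple comparison on (module, clz, category): lexicographic via String's '<'
-- (exact for any strings; String '<' in Lean is Python's string '<').
def pvLexLt3 (a b : String × String × String) : Bool :=
  decide (a.1 < b.1) || (a.1 == b.1 && (decide (a.2.1 < b.2.1) || (a.2.1 == b.2.1 && decide (a.2.2 < b.2.2))))

-- sorted(modules): stable sort, ported hand-for-hand as the insertBy fold that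
-- PySem.List.sorted itself is (sorted_eq_foldl_insertBy); exact for Python's stable lexicographic sort.
def pvSorted3 (xs : List (String × String × String)) : List (String × String × String) :=
  xs.foldl (fun acc x => PySem.List.insertBy pvLexLt3 x acc) []

-- the six lines yielded per module row (identical text in A and B)
def pvEntryLines (row : String × String × String) : List String :=
  let fullmodule := "h2o.estimators." ++ row.1 ++ "." ++ row.2.1
  let fullmodule := if row.2.1 == "H2OGridSearch" then "h2o.grid.grid_search.H2OGridSearch" else fullmodule
  [":mod:`" ++ row.2.1 ++ "`",
   String.mk (List.replicate (7 + row.2.1.length) '-'),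
   ".. autoclass:: " ++ fullmodule,
   "    :show-inheritance:",
   "    :members:",
   ""]

def gen_models_docs (modules : List (String × String × String)) : List String :=
  (["Supervised", "Unsupervised", "Miscellaneous"].foldl (fun acc cat =>
      (pvSorted3 modules).foldl (fun acc2 row =>
          if row.2.2 != cat then acc2 else acc2 ++ pvEntryLines row)
        (acc ++ ["", cat, String.mk (List.replicate cat.length '+'), ""]))
    [":tocdepth: 3", "", "Modeling In H2O", "==============="])

-- ===== PORT B =====
def pvCatBlock (cat : String) (rows : List (String × String × String)) : List String :=
  ["", cat, String.mk (List.replicate cat.length '+'), ""] ++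
    rows.foldl (fun acc row => acc ++ pvEntryLines row) []

def gen_models_docs_alt (modules : List (String × String × String)) : List String :=
  let b := (pvSorted3 modules).foldl (fun acc row =>
      if row.2.2 == "Supervised" then (acc.1 ++ [row], acc.2.1, acc.2.2)
      else if row.2.2 == "Unsupervised" then (acc.1, acc.2.1 ++ [row], acc.2.2)
      else if row.2.2 == "Miscellaneous" then (acc.1, acc.2.1, acc.2.2 ++ [row])
      else acc) (([], [], []) : List (String × String × String) × List (String × String × String) × List (String × String × String))
  [":tocdepth: 3", "", "Modeling In H2O", "==============="] ++
    pvCatBlock "Supervised" b.1 ++ pvCatBlock "Unsupervised" b.2.1 ++ pvCatBlock "Miscellaneous" b.2.2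

-- ===== PRECONDITION & SPEC =====
def Spec_gen_models_docs (modules : List (String × String × String)) (out : List String) : Prop := out = gen_models_docs_alt modules
instance (modules : List (String × String × String)) (out : List String) : Decidable (Spec_gen_models_docs modules out) := by unfold Spec_gen_models_docs; infer_instance

-- ===== CLAIM (what is proved, stated in full; the proofs are below) =====
def Claim_equal_gen_models_docs : Prop := ∀ (modules : List (String × String × String)), Dom_gen_models_docs modules → Spec_gen_models_docs modules (gen_models_docs modules)

-- ===== LEMMAS AND PROOFS =====

-- A's inner loop (skip rows of other categories) is the flatMap over the category's filter.
theorem pvInner_eq (cat : String) (s : List (String × String × String)) (init : List String) :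
    s.foldl (fun acc row => if row.2.2 != cat then acc else acc ++ pvEntryLines row) init
      = init ++ (s.filter (fun r => r.2.2 == cat)).flatMap pvEntryLines := by
  induction s generalizing init with
  | nil => simp
  | cons r t ih =>
    rcases Bool.eq_false_or_eq_true (r.2.2 == cat) with hb | hb
    · have hne : (r.2.2 != cat) = false := by simp [bne, hb]
      simp only [List.foldl_cons, hne, Bool.false_eq_true, if_false]
      rw [ih]
      simp [List.filter_cons, hb, List.append_assoc]
    · have hne : (r.2.2 != cat) = true := by simp [bne, hb]
      simp only [List.foldl_cons, hne, if_true]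
      rw [ih]
      simp [List.filter_cons, hb]

-- B's single bucketing pass computes the three category filters of the sorted list.
theorem pvBucket_eq (s : List (String × String × String))
    (a b c : List (String × String × String)) :
    s.foldl (fun acc row =>
        if row.2.2 == "Supervised" then (acc.1 ++ [row], acc.2.1, acc.2.2)
        else if row.2.2 == "Unsupervised" then (acc.1, acc.2.1 ++ [row], acc.2.2)
        else if row.2.2 == "Miscellaneous" then (acc.1, acc.2.1, acc.2.2 ++ [row])
        else acc) (a, b, c)
      = (a ++ s.filter (fun r => r.2.2 == "Supervised"),
         b ++ s.filter (fun r => r.2.2 == "Unsupervised"),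
         c ++ s.filter (fun r => r.2.2 == "Miscellaneous")) := by
  induction s generalizing a b c with
  | nil => simp
  | cons r t ih =>
    cases hb1 : (r.2.2 == "Supervised") with
    | true =>
      simp only [List.foldl_cons, hb1, if_true]
      have he : r.2.2 = "Supervised" := by simpa using hb1
      rw [ih]
      simp [he, List.append_assoc]
    | false =>
      cases hb2 : (r.2.2 == "Unsupervised") with
      | true =>
        simp only [List.foldl_cons, hb1, hb2, if_true, if_false, Bool.false_eq_true]
        have he : r.2.2 = "Unsupervised" := by simpa using hb2
        rw [ih]
        simp [he, List.append_assoc]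
      | false =>
        cases hb3 : (r.2.2 == "Miscellaneous") with
        | true =>
          simp only [List.foldl_cons, hb1, hb2, hb3, if_true, if_false, Bool.false_eq_true]
          have he : r.2.2 = "Miscellaneous" := by simpa using hb3
          rw [ih]
          simp [he, List.append_assoc]
        | false =>
          simp only [List.foldl_cons, hb1, hb2, hb3, if_false, Bool.false_eq_true]
          rw [ih]
          simp [hb1, hb2, hb3]

-- ===== VERDICT (by name: the statement is the Claim_ definition above) =====
theorem gen_models_docs_spec : Claim_equal_gen_models_docs := by
  intro modules _
  unfold Spec_gen_models_docs gen_models_docs gen_models_docs_alt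
  simp only [List.foldl, pvBucket_eq, pvInner_eq, pvCatBlock,
    PySem.List.foldl_append_eq_flatMap, List.nil_append, List.append_assoc]
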